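-- pv_equiv track=rewrite | github.com/raghav-ambitus/env-sample | backend/generate_puzzle.py | rotations_and_reflections
-- ===== SOURCE A (Python) =====
-- def normalize(cells):
--     xs = [x for x,y in cells]
--     ys = [y for x,y in cells]
--     minx, miny = min(xs), min(ys)
--     return tuple(sorted(((x-minx, y-miny) for x,y in cells)))
--
-- def rotations_and_reflections(shape):
--     cells = list(shape)
--     variants = set()
--     for flip_x in (False, True):
--         for flip_y in (False, True):
--             for rot in range(4):
--                 pts = []
--                 for x,y in cells:
--                     nx, ny = x, y
--                     if flip_x: nx = -nx
--                     if flip_y: ny = -ny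
--                     rx, ry = nx, ny
--                     for _ in range(rot):
--                         rx, ry = -ry, rx
--                     pts.append((rx, ry))
--                 variants.add(normalize(pts))
--     return variants
-- ===== SOURCE B (Python) =====
-- def normalize(cells):
--     xs = [x for x,y in cells]
--     ys = [y for x,y in cells]
--     minx, miny = min(xs), min(ys)
--     return tuple(sorted(((x-minx, y-miny) for x,y in cells)))
--
-- # the eight symmetries of the square as closed-form coordinate maps
-- TRANSFORMS = [
--     lambda x, y: (x, y),
--     lambda x, y: (-y, x),
--     lambda x, y: (-x, -y),
--     lambda x, y: (y, -x),
--     lambda x, y: (x, -y),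
--     lambda x, y: (y, x),
--     lambda x, y: (-x, y),
--     lambda x, y: (-y, -x),
-- ]
--
-- def rotations_and_reflections(shape):
--     cells = list(shape)
--     variants = set()
--     for t in TRANSFORMS:
--         variants.add(normalize([t(x, y) for x, y in cells]))
--     return variants
-- ===== Notes on version B (the rewrite author's own statement) =====
-- stated objective: simpler
-- what changed: Replaced the nested flip_x/flip_y/rot loops (16 combinations with an incremental rx,ry=-ry,rx rotation loop) by a single flat pass over the eight dihedral symmetries of the square written as closed-form coordinate maps.
import Mathlib
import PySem

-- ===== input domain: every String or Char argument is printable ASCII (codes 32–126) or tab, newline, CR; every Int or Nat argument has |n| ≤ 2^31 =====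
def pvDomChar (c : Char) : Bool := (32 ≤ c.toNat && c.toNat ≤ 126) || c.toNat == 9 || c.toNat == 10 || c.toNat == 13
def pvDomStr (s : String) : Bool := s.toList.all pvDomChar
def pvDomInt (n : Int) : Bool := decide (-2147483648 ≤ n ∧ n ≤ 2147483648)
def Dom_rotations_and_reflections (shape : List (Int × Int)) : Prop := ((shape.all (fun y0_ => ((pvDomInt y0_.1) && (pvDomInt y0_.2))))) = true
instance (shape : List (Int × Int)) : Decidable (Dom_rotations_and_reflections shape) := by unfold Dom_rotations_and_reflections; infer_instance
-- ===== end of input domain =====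

-- B replaces A's nested flip/flip/rot loops by one flat pass over the eight
-- closed-form dihedral symmetries of the square (simpler, half the passes).

-- ===== PORT A =====
-- normalize is byte-for-byte the same helper in both Pythons; min([]) raises
-- ValueError in Python, here getD 0 is never reached inside Pre_ (shape ≠ []).
def pvNormalize (cells : List (Int × Int)) : List (Int × Int) :=
  let xs := cells.map (fun c => c.1)
  let ys := cells.map (fun c => c.2)
  let minx := (PySem.List.min? xs (fun v => v)).getD 0
  let miny := (PySem.List.min? ys (fun v => v)).getD 0
  PySem.List.sorted2 (cells.map (fun c => (c.1 - minx, c.2 - miny)))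
    (fun p => p.1) (fun p => p.2) false

def rotations_and_reflections (shape : List (Int × Int)) : List (List (Int × Int)) :=
  let cells := shape
  [false, true].foldl (fun variants flip_x =>
    [false, true].foldl (fun variants flip_y =>
      (PySem.List.pyRange 0 4 1).foldl (fun variants rot =>
        let pts := cells.foldl (fun pts c =>
          let nx := if flip_x then -c.1 else c.1
          let ny := if flip_y then -c.2 else c.2
          let r := (PySem.List.pyRange 0 rot 1).foldl
            (fun (p : Int × Int) _ => (-p.2, p.1)) (nx, ny)
          pts ++ [r]) []
        PySem.Set.add variants (pvNormalize pts)) variants) variants)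
    (PySem.Set.empty)

-- ===== PORT B =====
def pvTransforms : List ((Int × Int) → (Int × Int)) :=
  [fun p => (p.1, p.2), fun p => (-p.2, p.1), fun p => (-p.1, -p.2), fun p => (p.2, -p.1),
   fun p => (p.1, -p.2), fun p => (p.2, p.1), fun p => (-p.1, p.2), fun p => (-p.2, -p.1)]

def rotations_and_reflections_alt (shape : List (Int × Int)) : List (List (Int × Int)) :=
  let cells := shape
  pvTransforms.foldl (fun variants t =>
    PySem.Set.add variants (pvNormalize (cells.map t))) (PySem.Set.empty)

-- ===== PRECONDITION & SPEC =====
-- Pre_ excludes only the empty shape, on which both Pythons raise ValueError (min of an empty list).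
def Pre_rotations_and_reflections (shape : List (Int × Int)) : Prop := shape ≠ []
instance (shape : List (Int × Int)) : Decidable (Pre_rotations_and_reflections shape) := by unfold Pre_rotations_and_reflections; infer_instance
def pvWitness_rotations_and_reflections : (List (Int × Int)) := [(0, 0), (1, 0)]
def Spec_rotations_and_reflections (shape : List (Int × Int)) (out : List (List (Int × Int))) : Prop := out = rotations_and_reflections_alt shape
instance (shape : List (Int × Int)) (out : List (List (Int × Int))) : Decidable (Spec_rotations_and_reflections shape out) := by unfold Spec_rotations_and_reflections; infer_instance

-- ===== CLAIM (what is proved, stated in full; the proofs are below) =====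
def Claim_equal_rotations_and_reflections : Prop := ∀ (shape : List (Int × Int)), Dom_rotations_and_reflections shape → Pre_rotations_and_reflections shape → Spec_rotations_and_reflections shape (rotations_and_reflections shape)

-- ===== LEMMAS AND PROOFS =====

-- A's 16 flip/flip/rot combinations reduce to the eight closed-form maps (each of the
-- last eight duplicates an earlier one, so its Set.add is a no-op).
theorem rotations_and_reflections_eq_alt (shape : List (Int × Int)) :
    rotations_and_reflections shape = rotations_and_reflections_alt shape := by
  unfold rotations_and_reflections rotations_and_reflections_alt pvTransforms
  have hR : PySem.List.pyRange 0 4 1 = [0,1,2,3] := by decide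
  have h0 : PySem.List.pyRange 0 0 1 = [] := by decide
  have h1 : PySem.List.pyRange 0 1 1 = [0] := by decide
  have h2 : PySem.List.pyRange 0 2 1 = [0,1] := by decide
  have h3 : PySem.List.pyRange 0 3 1 = [0,1,2] := by decide
  simp only [hR, h0, h1, h2, h3, List.foldl_cons, List.foldl_nil,
    PySem.List.foldl_append_singleton_eq_map, List.nil_append,
    if_true, if_false, Bool.false_eq_true, neg_neg]
  generalize pvNormalize (List.map (fun x : ℤ × ℤ => (x.1, x.2)) shape) = n1
  generalize pvNormalize (List.map (fun x : ℤ × ℤ => (-x.2, x.1)) shape) = n2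
  generalize pvNormalize (List.map (fun x : ℤ × ℤ => (-x.1, -x.2)) shape) = n3
  generalize pvNormalize (List.map (fun x : ℤ × ℤ => (x.2, -x.1)) shape) = n4
  generalize pvNormalize (List.map (fun x : ℤ × ℤ => (x.1, -x.2)) shape) = n5
  generalize pvNormalize (List.map (fun x : ℤ × ℤ => (x.2, x.1)) shape) = n6
  generalize pvNormalize (List.map (fun x : ℤ × ℤ => (-x.1, x.2)) shape) = n7
  generalize pvNormalize (List.map (fun x : ℤ × ℤ => (-x.2, -x.1)) shape) = n8
  rw [PySem.Set.add_of_mem (by simp [PySem.Set.mem_add]),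
      PySem.Set.add_of_mem (by simp [PySem.Set.mem_add]),
      PySem.Set.add_of_mem (by simp [PySem.Set.mem_add]),
      PySem.Set.add_of_mem (by simp [PySem.Set.mem_add]),
      PySem.Set.add_of_mem (by simp [PySem.Set.mem_add]),
      PySem.Set.add_of_mem (by simp [PySem.Set.mem_add]),
      PySem.Set.add_of_mem (by simp [PySem.Set.mem_add]),
      PySem.Set.add_of_mem (by simp [PySem.Set.mem_add])]

-- ===== VERDICT (by name: the statement is the Claim_ definition above) =====
theorem rotations_and_reflections_spec : Claim_equal_rotations_and_reflections := by
  intro shape _ _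
  exact rotations_and_reflections_eq_alt shape
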